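-- pv_equiv track=rewrite | github.com/mattjp/leetcode | practice/hard/0403-Frog_Jump.py | canCross
-- ===== SOURCE A (Python) =====
-- from typing import List
--
-- def canCross(stones: List[int]) -> bool:
--   """
--   DFS
--   stack = [(pos, k)]
--   ex: 0,1,3,5,6,8,12,17
--   [(0, 0)]
--   [(-1, -1), (0, 0), (1, 1)] <- don't add combos we've seen or that are negative
--   => [(1, 1)]
--   [(1, 0), (2, 1), (3, 2)] <- don't go to positions that aren't stones
--   => [(1, 0), (3, 2)]
--   """
--
--   stone_set = set(stones) # reachable stones, O(1)
--   seen = set() # don't go to (stone,k) combos we've seen before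
--   target = stones[-1] # if we hit this stone, we win
--   stack = [(0, 0)] # starting at stone 0
--
--   while stack:
--     pos,k = stack.pop() # DFS, LIFO
--     if pos == target:
--       return True
--     if pos in stone_set: # this position is a stone
--       for l in [k-1, k, k+1]: # we can make any of these 3 jumps
--         if pos+l > 0 and (pos+l,l) not in seen: # don't duplicate/go backwards
--           seen.add((pos+l,l))
--           stack.append((pos+l,l))
--
--   return False
-- ===== SOURCE B (Python) =====
-- from typing import List
--
-- def canCross(stones: List[int]) -> bool:
--   # Level-synchronous fixpoint saturation over (position, jump) states instead of
--   # a depth-first stack search: expand the whole frontier each round until no new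
--   # state appears, then read the answer off the saturated state set.
--   target = stones[-1]
--   stone_set = set(stones)
--   states = {(0, 0)}
--   frontier = {(0, 0)}
--   while frontier:
--     new = set()
--     for (pos, k) in frontier:
--       if pos in stone_set:
--         for l in (k - 1, k, k + 1):
--           if pos + l > 0:
--             s = (pos + l, l)
--             if s not in states:
--               new.add(s)
--     states |= new
--     frontier = new
--   return any(pos == target for (pos, k) in states)
-- ===== Notes on version B (the rewrite author's own statement) =====
-- stated objective: alternative
-- what changed: A's depth-first stack search with early exit over (position, jump) states is replaced by a level-synchronous fixpoint saturation: each round expands the whole frontier of newly discovered states until nothing new appears, and the answer is read off the saturated state set at the end.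
import Mathlib
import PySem

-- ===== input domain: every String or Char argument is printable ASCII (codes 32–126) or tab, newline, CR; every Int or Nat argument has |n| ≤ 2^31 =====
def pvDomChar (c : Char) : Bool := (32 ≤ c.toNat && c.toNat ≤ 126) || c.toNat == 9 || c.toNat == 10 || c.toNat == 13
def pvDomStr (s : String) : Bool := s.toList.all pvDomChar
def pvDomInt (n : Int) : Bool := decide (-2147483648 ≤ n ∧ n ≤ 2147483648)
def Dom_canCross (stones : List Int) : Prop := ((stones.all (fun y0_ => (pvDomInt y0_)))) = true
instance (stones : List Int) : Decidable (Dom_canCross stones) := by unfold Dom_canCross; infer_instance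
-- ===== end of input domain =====

-- B replaces A's depth-first stack search (with early exit) over (position, jump) states
-- by a level-synchronous fixpoint saturation that expands the whole frontier each round
-- and reads the answer off the saturated state set; return values are proved equal on
-- nonempty stone lists.

-- ===== PORT A =====
-- Shared helper: every state either search can ever record lies in a finite box of
-- states; `ubCard` is that box's size.  Both ports use it only as a fuel bound that
-- the Python loops (which simply run until done) are proved never to exhaust.
def bigM (l : List Int) : Int := l.foldl (fun m x => max m x) 0

def ubCard (M : Int) : Nat := (2 * M + 1).toNat * (3 * M + 1).toNat

-- `for l in [k-1, k, k+1]: if pos+l > 0 and (pos+l,l) not in seen: seen.add(..); stack.append(..)`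
-- (the guard guarantees freshness, so the set-add is an append)
def expandA (p k : Int) (seen stack : List (Int × Int)) : List (Int × Int) × List (Int × Int) :=
  List.foldl
    (fun st l =>
      if 0 < p + l ∧ (p + l, l) ∉ st.1 then (st.1 ++ [(p + l, l)], (p + l, l) :: st.2) else st)
    (seen, stack) [k - 1, k, k + 1]

-- the `while stack:` loop; `fuel` only makes it total in Lean (Python runs until done)
def loopA (SS : List Int) (target : Int) : Nat → List (Int × Int) → List (Int × Int) → Bool
  | 0, _, _ => false
  | _ + 1, [], _ => false
  | fuel + 1, (p, k) :: rest, seen =>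
    if p = target then true
    else if p ∈ SS then
      loopA SS target fuel (expandA p k seen rest).2 (expandA p k seen rest).1
    else loopA SS target fuel rest seen

def canCross (stones : List Int) : Bool :=
  match PySem.List.pyGet? stones (-1) with
  | none => false   -- Python raises IndexError here (empty list); excluded by Pre_
  | some target =>
    loopA (PySem.Set.ofList stones) target
      (2 * (ubCard (bigM (PySem.Set.ofList stones)) + 1) + 1) [(0, 0)] []

-- ===== PORT B =====
-- `if pos+l > 0: s = (pos+l, l); if s not in states: new.add(s)`
def addSucc (states : List (Int × Int)) (p : Int) (acc : List (Int × Int)) (l : Int) :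
    List (Int × Int) :=
  if 0 < p + l ∧ (p + l, l) ∉ states then PySem.Set.add acc (p + l, l) else acc

-- one round: every successor of a frontier state that is not yet recorded
def newOf (SS : List Int) (states frontier : List (Int × Int)) : List (Int × Int) :=
  frontier.foldl
    (fun acc s =>
      if s.1 ∈ SS then List.foldl (addSucc states s.1) acc [s.2 - 1, s.2, s.2 + 1] else acc)
    []

-- the `while frontier:` saturation loop; `fuel` only makes it total in Lean
def loopB (SS : List Int) : Nat → List (Int × Int) → List (Int × Int) → List (Int × Int)
  | 0, states, _ => states
  | fuel + 1, states, frontier =>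
    if frontier = [] then states
    else loopB SS fuel (states ++ newOf SS states frontier) (newOf SS states frontier)

def canCross_alt (stones : List Int) : Bool :=
  match PySem.List.pyGet? stones (-1) with
  | none => false   -- Python raises IndexError here (empty list); excluded by Pre_
  | some target =>
    (loopB (PySem.Set.ofList stones) (ubCard (bigM (PySem.Set.ofList stones)) + 3)
        [(0, 0)] [(0, 0)]).any (fun s => decide (s.1 = target))

-- ===== PRECONDITION & SPEC =====
-- Pre_ excludes only the empty list, on which Python's last-element lookup raises
-- IndexError (B raises there as well).
def Pre_canCross (stones : List Int) : Prop := stones ≠ []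
instance (stones : List Int) : Decidable (Pre_canCross stones) := by
  unfold Pre_canCross; infer_instance

def pvWitness_canCross : List Int := [0, 1, 3, 5, 6, 8, 12, 17]

def Spec_canCross (stones : List Int) (out : Bool) : Prop := out = canCross_alt stones
instance (stones : List Int) (out : Bool) : Decidable (Spec_canCross stones out) := by
  unfold Spec_canCross; infer_instance

-- ===== CLAIM (what is proved, stated in full; the proofs are below) =====
def Claim_equal_canCross : Prop :=
  ∀ (stones : List Int), Dom_canCross stones → Pre_canCross stones →
    Spec_canCross stones (canCross stones)

-- ===== LEMMAS AND PROOFS =====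

-- the finite box of states, proof-side only
noncomputable def UB (M : Int) : Finset (Int × Int) :=
  (Finset.Icc 1 (2 * M + 1)) ×ˢ (Finset.Icc (1 - M) (2 * M + 1))

lemma ubCard_eq (M : Int) : (UB M).card = ubCard M := by
  rw [UB, Finset.card_product, Int.card_Icc, Int.card_Icc, ubCard]
  congr 1 <;> omega

lemma mem_UB (M : Int) (s : Int × Int) :
    s ∈ UB M ↔ 1 ≤ s.1 ∧ s.1 ≤ 2 * M + 1 ∧ 1 - M ≤ s.2 ∧ s.2 ≤ 2 * M + 1 := by
  simp [UB, Finset.mem_product, Finset.mem_Icc]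
  tauto

lemma foldl_max_init : ∀ (l : List Int) (a : Int), a ≤ l.foldl (fun m x => max m x) a := by
  intro l
  induction l with
  | nil => intro a; simp
  | cons y t ih =>
    intro a
    simp only [List.foldl_cons]
    exact le_trans (le_max_left a y) (ih (max a y))

lemma foldl_max_mem : ∀ (l : List Int) (a x : Int), x ∈ l → x ≤ l.foldl (fun m x => max m x) a := by
  intro l
  induction l with
  | nil => intro a x hx; simp at hx
  | cons y t ih =>
    intro a x hx
    simp only [List.foldl_cons]
    rcases List.mem_cons.mp hx with rfl | hx'
    · exact le_trans (le_max_right a x) (foldl_max_init t (max a x))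
    · exact ih (max a y) x hx'

lemma zero_le_bigM (l : List Int) : 0 ≤ bigM l := foldl_max_init l 0

lemma le_bigM (l : List Int) (x : Int) (h : x ∈ l) : x ≤ bigM l := foldl_max_mem l 0 x h

lemma length_le_card {α : Type} [DecidableEq α] (l : List α) (F : Finset α)
    (h1 : l.Nodup) (h2 : ∀ x ∈ l, x ∈ F) : l.length ≤ F.card := by
  rw [← List.toFinset_card_of_nodup h1]
  exact Finset.card_le_card (fun x hx => h2 x (List.mem_toFinset.mp hx))

-- the states A's DFS can still discover from `stack` under the `seen` pruning set
inductive RS (SS : List Int) (seen stack : List (Int × Int)) : Int × Int → Prop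
  | base (s : Int × Int) : s ∈ stack → RS SS seen stack s
  | step (p k l : Int) : RS SS seen stack (p, k) → p ∈ SS →
      (l = k - 1 ∨ l = k ∨ l = k + 1) → 0 < p + l → (p + l, l) ∉ seen →
      RS SS seen stack (p + l, l)

-- the closure B saturates towards
inductive Cl (SS : List Int) (init : List (Int × Int)) : Int × Int → Prop
  | base (s : Int × Int) : s ∈ init → Cl SS init s
  | step (p k l : Int) : Cl SS init (p, k) → p ∈ SS →
      (l = k - 1 ∨ l = k ∨ l = k + 1) → 0 < p + l → Cl SS init (p + l, l)

lemma RS_nil (SS : List Int) (seen : List (Int × Int)) (s : Int × Int) :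
    ¬ RS SS seen [] s := by
  intro h
  induction h with
  | base t ht => simp at ht
  | step p k l hq hSS hl hpos hnot ih => exact ih

-- the list of states A pushes when expanding against `seen`, generic in the jump list
def pushedG (p : Int) (ls : List Int) (seen : List (Int × Int)) : List (Int × Int) :=
  (ls.filter (fun l => decide (0 < p + l ∧ (p + l, l) ∉ seen))).map (fun l => (p + l, l))

-- the states A pushes when expanding (p, k)
def pushedL (p k : Int) (seen : List (Int × Int)) : List (Int × Int) :=
  pushedG p [k - 1, k, k + 1] seen

lemma mem_pushedL (p k : Int) (seen : List (Int × Int)) (s : Int × Int) :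
    s ∈ pushedL p k seen ↔
      ∃ l, (l = k - 1 ∨ l = k ∨ l = k + 1) ∧ s = (p + l, l) ∧ 0 < p + l ∧ s ∉ seen := by
  simp only [pushedL, pushedG, List.mem_map, List.mem_filter, List.mem_cons,
    List.not_mem_nil, or_false, decide_eq_true_eq]
  constructor
  · rintro ⟨l, ⟨hl, h1, h2⟩, rfl⟩
    exact ⟨l, hl, rfl, h1, h2⟩
  · rintro ⟨l, hl, rfl, h1, h2⟩
    exact ⟨l, ⟨hl, h1, h2⟩, rfl⟩

lemma nodup3 (k : Int) : ([k - 1, k, k + 1] : List Int).Nodup := by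
  refine List.nodup_cons.mpr ⟨?_, List.nodup_cons.mpr ⟨?_, List.nodup_singleton _⟩⟩
  · simp only [List.mem_cons, List.not_mem_nil, or_false]
    omega
  · simp only [List.mem_cons, List.not_mem_nil, or_false]
    omega

lemma nodup_pushedG (p : Int) (ls : List Int) (seen : List (Int × Int))
    (hls : ls.Nodup) : (pushedG p ls seen).Nodup := by
  apply List.Nodup.map
  · intro a b h
    have := congrArg Prod.snd h
    simpa using this
  · exact hls.filter _

lemma nodup_pushedL (p k : Int) (seen : List (Int × Int)) : (pushedL p k seen).Nodup :=
  nodup_pushedG p _ seen (nodup3 k)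

lemma pushedG_congr (p : Int) (ls : List Int) (seen seen' : List (Int × Int))
    (h : ∀ l ∈ ls, ((p + l, l) ∈ seen') ↔ ((p + l, l) ∈ seen)) :
    pushedG p ls seen' = pushedG p ls seen := by
  unfold pushedG
  congr 1
  apply List.filter_congr
  intro l hl
  rw [decide_eq_decide]
  constructor
  · rintro ⟨h1, h2⟩; exact ⟨h1, fun hc => h2 ((h l hl).mpr hc)⟩
  · rintro ⟨h1, h2⟩; exact ⟨h1, fun hc => h2 ((h l hl).mp hc)⟩

lemma foldl_expand_gen (p : Int) :
    ∀ (ls : List Int), ls.Nodup → ∀ (seen stack : List (Int × Int)),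
      List.foldl
        (fun st l =>
          if 0 < p + l ∧ (p + l, l) ∉ st.1 then (st.1 ++ [(p + l, l)], (p + l, l) :: st.2)
          else st)
        (seen, stack) ls =
      (seen ++ pushedG p ls seen, (pushedG p ls seen).reverse ++ stack) := by
  intro ls
  induction ls with
  | nil => intro _ seen stack; simp [pushedG]
  | cons a t ih =>
    intro hnd seen stack
    have hat : a ∉ t := (List.nodup_cons.mp hnd).1
    have hte : t.Nodup := (List.nodup_cons.mp hnd).2
    rw [List.foldl_cons]
    by_cases ca : 0 < p + a ∧ (p + a, a) ∉ seen
    · rw [if_pos ca, ih hte]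
      have hc : pushedG p t (seen ++ [(p + a, a)]) = pushedG p t seen := by
        apply pushedG_congr
        intro l hl
        have hne : ((p + l, l) : Int × Int) ≠ (p + a, a) := by
          intro h
          rw [Prod.mk.injEq] at h
          exact hat (h.2 ▸ hl)
        simp [List.mem_append, hne]
      have hp : pushedG p (a :: t) seen = (p + a, a) :: pushedG p t seen := by
        unfold pushedG
        rw [List.filter_cons]
        simp [ca]
      rw [hc, hp]
      simp [List.reverse_cons, List.append_assoc]
    · rw [if_neg ca, ih hte]
      have hp : pushedG p (a :: t) seen = pushedG p t seen := by
        unfold pushedG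
        rw [List.filter_cons]
        simp [ca]
      rw [hp]

lemma expandA_eq (p k : Int) (seen stack : List (Int × Int)) :
    expandA p k seen stack =
      (seen ++ pushedL p k seen, (pushedL p k seen).reverse ++ stack) :=
  foldl_expand_gen p [k - 1, k, k + 1] (nodup3 k) seen stack

-- bounds on pushed states: they stay inside the box `UB (bigM SS)`
lemma pushed_bounds (SS : List Int) (p k : Int) (seen : List (Int × Int))
    (hpSS : p ∈ SS) (_h0 : 0 ≤ p) (hk : k ≤ p) :
    ∀ s ∈ pushedL p k seen, (0 ≤ s.1 ∧ s.2 ≤ s.1) ∧ s ∈ UB (bigM SS) := by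
  intro s hs
  obtain ⟨l, hl, rfl, hpos, hnot⟩ := (mem_pushedL p k seen s).mp hs
  have hpM : p ≤ bigM SS := le_bigM SS p hpSS
  have hM0 : 0 ≤ bigM SS := zero_le_bigM SS
  rw [mem_UB]
  dsimp only
  rcases hl with rfl | rfl | rfl <;> refine ⟨⟨by omega, by omega⟩, by omega, by omega, by omega, by omega⟩

def SeenInv (M : Int) (seen : List (Int × Int)) : Prop :=
  seen.Nodup ∧ ∀ s ∈ seen, s ∈ UB M

def StackInvA (stack : List (Int × Int)) : Prop :=
  ∀ s ∈ stack, 0 ≤ s.1 ∧ s.2 ≤ s.1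

lemma RS_expand_iff (SS : List Int) (seen rest : List (Int × Int)) (p k : Int)
    (hp : p ∈ SS) (x : Int × Int) :
    RS SS seen ((p, k) :: rest) x ↔
      (x = (p, k) ∨
        RS SS (seen ++ pushedL p k seen) ((pushedL p k seen).reverse ++ rest) x) := by
  constructor
  · intro h
    induction h with
    | base t ht =>
      rcases List.mem_cons.mp ht with h' | h'
      · exact Or.inl h'
      · exact Or.inr (RS.base t (List.mem_append_right _ h'))
    | step q m l hq hqSS hl hpos hnot ih =>
      rcases ih with h' | h'
      · rw [Prod.mk.injEq] at h'
        obtain ⟨rfl, rfl⟩ := h'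
        have hmem : (q + l, l) ∈ pushedL q m seen :=
          (mem_pushedL q m seen _).mpr ⟨l, hl, rfl, hpos, hnot⟩
        exact Or.inr (RS.base _ (List.mem_append_left _ (List.mem_reverse.mpr hmem)))
      · by_cases hc : (q + l, l) ∈ pushedL p k seen
        · exact Or.inr (RS.base _ (List.mem_append_left _ (List.mem_reverse.mpr hc)))
        · refine Or.inr (RS.step q m l h' hqSS hl hpos ?_)
          intro hmem
          rcases List.mem_append.mp hmem with h'' | h''
          · exact hnot h''
          · exact hc h''
  · intro h
    rcases h with rfl | h
    · exact RS.base _ (List.mem_cons_self)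
    · induction h with
      | base t ht =>
        rcases List.mem_append.mp ht with h' | h'
        · obtain ⟨l, hl, rfl, hpos, hnot⟩ :=
            (mem_pushedL p k seen t).mp (List.mem_reverse.mp h')
          exact RS.step p k l (RS.base _ (List.mem_cons_self)) hp hl hpos hnot
        · exact RS.base t (List.mem_cons_of_mem _ h')
      | step q m l hq hqSS hl hpos hnot ih =>
        exact RS.step q m l ih hqSS hl hpos (fun hc => hnot (List.mem_append_left _ hc))

lemma RS_skip_iff (SS : List Int) (seen rest : List (Int × Int)) (p k : Int)
    (hp : p ∉ SS) (x : Int × Int) :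
    RS SS seen ((p, k) :: rest) x ↔ (x = (p, k) ∨ RS SS seen rest x) := by
  constructor
  · intro h
    induction h with
    | base t ht =>
      rcases List.mem_cons.mp ht with h' | h'
      · exact Or.inl h'
      · exact Or.inr (RS.base t h')
    | step q m l hq hqSS hl hpos hnot ih =>
      rcases ih with h' | h'
      · rw [Prod.mk.injEq] at h'
        obtain ⟨rfl, rfl⟩ := h'
        exact absurd hqSS hp
      · exact Or.inr (RS.step q m l h' hqSS hl hpos hnot)
  · intro h
    rcases h with rfl | h
    · exact RS.base _ (List.mem_cons_self)
    · induction h with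
      | base t ht => exact RS.base t (List.mem_cons_of_mem _ ht)
      | step q m l hq hqSS hl hpos hnot ih => exact RS.step q m l ih hqSS hl hpos hnot

lemma loopA_iff (SS : List Int) (target : Int) :
    ∀ (fuel : Nat) (stack seen : List (Int × Int)),
      SeenInv (bigM SS) seen → StackInvA stack →
      2 * ((UB (bigM SS)).card + 1 - seen.length) + stack.length ≤ fuel →
      (loopA SS target fuel stack seen = true ↔ ∃ m, RS SS seen stack (target, m)) := by
  intro fuel
  induction fuel with
  | zero =>
    intro stack seen h1 h2 hle
    have := length_le_card seen (UB (bigM SS)) h1.1 h1.2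
    omega
  | succ n ih =>
    intro stack seen h1 h2 hle
    match stack with
    | [] =>
      rw [show loopA SS target (n + 1) [] seen = false from rfl]
      simp only [Bool.false_eq_true, false_iff]
      rintro ⟨m, hm⟩
      exact RS_nil SS seen _ hm
    | (p, k) :: rest =>
      rw [show loopA SS target (n + 1) ((p, k) :: rest) seen =
        (if p = target then true
         else if p ∈ SS then
           loopA SS target n (expandA p k seen rest).2 (expandA p k seen rest).1
         else loopA SS target n rest seen) from rfl]
      by_cases ht : p = target
      · subst ht
        rw [if_pos rfl]
        simp only [true_iff]
        exact ⟨k, RS.base _ (List.mem_cons_self)⟩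
      · rw [if_neg ht]
        by_cases hSS : p ∈ SS
        · rw [if_pos hSS, expandA_eq]
          dsimp only
          have hpk := h2 (p, k) (List.mem_cons_self)
          have hb := pushed_bounds SS p k seen hSS hpk.1 hpk.2
          have h1' : SeenInv (bigM SS) (seen ++ pushedL p k seen) := by
            refine ⟨List.Nodup.append h1.1 (nodup_pushedL p k seen) ?_, ?_⟩
            · intro a ha hpa
              obtain ⟨l, _, rfl, _, hn⟩ := (mem_pushedL p k seen a).mp hpa
              exact hn ha
            · intro s hs
              rcases List.mem_append.mp hs with h' | h'
              · exact h1.2 s h'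
              · exact (hb s h').2
          have h2' : StackInvA ((pushedL p k seen).reverse ++ rest) := by
            intro s hs
            rcases List.mem_append.mp hs with h' | h'
            · exact (hb s (List.mem_reverse.mp h')).1
            · exact h2 s (List.mem_cons_of_mem _ h')
          have hcard := length_le_card _ _ h1'.1 h1'.2
          rw [List.length_append] at hcard
          have hle' : 2 * ((UB (bigM SS)).card + 1 - (seen ++ pushedL p k seen).length) +
              ((pushedL p k seen).reverse ++ rest).length ≤ n := by
            rw [List.length_append, List.length_append, List.length_reverse]
            simp only [List.length_cons] at hle
            omega
          rw [ih _ _ h1' h2' hle']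
          constructor
          · rintro ⟨m, hm⟩
            exact ⟨m, (RS_expand_iff SS seen rest p k hSS _).mpr (Or.inr hm)⟩
          · rintro ⟨m, hm⟩
            rcases (RS_expand_iff SS seen rest p k hSS _).mp hm with heq | h'
            · exact absurd (congrArg Prod.fst heq).symm ht
            · exact ⟨m, h'⟩
        · rw [if_neg hSS]
          have hle' : 2 * ((UB (bigM SS)).card + 1 - seen.length) + rest.length ≤ n := by
            simp only [List.length_cons] at hle
            omega
          rw [ih _ _ h1 (fun s hs => h2 s (List.mem_cons_of_mem _ hs)) hle']
          constructor
          · rintro ⟨m, hm⟩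
            exact ⟨m, (RS_skip_iff SS seen rest p k hSS _).mpr (Or.inr hm)⟩
          · rintro ⟨m, hm⟩
            rcases (RS_skip_iff SS seen rest p k hSS _).mp hm with heq | h'
            · exact absurd (congrArg Prod.fst heq).symm ht
            · exact ⟨m, h'⟩

-- ===== B-side lemmas =====

lemma nodup_set_add {x : Int × Int} {s : List (Int × Int)} (h : s.Nodup) :
    (PySem.Set.add s x).Nodup := by
  rw [PySem.Set.add_eq_ite]
  split
  · exact h
  · next hx =>
    refine List.Nodup.append h (List.nodup_singleton x) ?_
    intro a ha hb
    simp at hb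
    subst hb
    exact hx ha

lemma mem_foldl_addSucc (states : List (Int × Int)) (p : Int) :
    ∀ (ls : List Int) (acc : List (Int × Int)) (x : Int × Int),
      x ∈ List.foldl (addSucc states p) acc ls ↔
        x ∈ acc ∨ ∃ l ∈ ls, x = (p + l, l) ∧ 0 < p + l ∧ x ∉ states := by
  intro ls
  induction ls with
  | nil => intro acc x; simp
  | cons a t ihl =>
    intro acc x
    simp only [List.foldl_cons]
    rw [ihl]
    unfold addSucc
    by_cases hc : 0 < p + a ∧ (p + a, a) ∉ states
    · rw [if_pos hc, PySem.Set.mem_add]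
      constructor
      · rintro ((h | rfl) | ⟨l, hl, rfl, hp1, hp2⟩)
        · exact Or.inl h
        · exact Or.inr ⟨a, List.mem_cons_self, rfl, hc.1, hc.2⟩
        · exact Or.inr ⟨l, List.mem_cons_of_mem _ hl, rfl, hp1, hp2⟩
      · rintro (h | ⟨l, hl, rfl, hp1, hp2⟩)
        · exact Or.inl (Or.inl h)
        · rcases List.mem_cons.mp hl with rfl | hl'
          · exact Or.inl (Or.inr rfl)
          · exact Or.inr ⟨l, hl', rfl, hp1, hp2⟩
    · rw [if_neg hc]
      constructor
      · rintro (h | ⟨l, hl, rfl, hp1, hp2⟩)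
        · exact Or.inl h
        · exact Or.inr ⟨l, List.mem_cons_of_mem _ hl, rfl, hp1, hp2⟩
      · rintro (h | ⟨l, hl, rfl, hp1, hp2⟩)
        · exact Or.inl h
        · rcases List.mem_cons.mp hl with rfl | hl'
          · exact absurd ⟨hp1, hp2⟩ hc
          · exact Or.inr ⟨l, hl', rfl, hp1, hp2⟩

lemma nodup_foldl_addSucc (states : List (Int × Int)) (p : Int) :
    ∀ (ls : List Int) (acc : List (Int × Int)), acc.Nodup →
      (List.foldl (addSucc states p) acc ls).Nodup := by
  intro ls
  induction ls with
  | nil => intro acc h; simpa using h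
  | cons a t ihl =>
    intro acc h
    simp only [List.foldl_cons]
    apply ihl
    unfold addSucc
    split
    · exact nodup_set_add h
    · exact h

lemma mem_newOf (SS : List Int) (states : List (Int × Int)) :
    ∀ (frontier : List (Int × Int)) (x : Int × Int),
      x ∈ newOf SS states frontier ↔
        ∃ s ∈ frontier, s.1 ∈ SS ∧ ∃ l, (l = s.2 - 1 ∨ l = s.2 ∨ l = s.2 + 1) ∧
          x = (s.1 + l, l) ∧ 0 < s.1 + l ∧ x ∉ states := by
  have aux : ∀ (fr : List (Int × Int)) (acc : List (Int × Int)) (x : Int × Int),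
      x ∈ fr.foldl
          (fun acc s =>
            if s.1 ∈ SS then List.foldl (addSucc states s.1) acc [s.2 - 1, s.2, s.2 + 1]
            else acc) acc ↔
        x ∈ acc ∨ ∃ s ∈ fr, s.1 ∈ SS ∧ ∃ l, (l = s.2 - 1 ∨ l = s.2 ∨ l = s.2 + 1) ∧
          x = (s.1 + l, l) ∧ 0 < s.1 + l ∧ x ∉ states := by
    intro fr
    induction fr with
    | nil => intro acc x; simp
    | cons s t iht =>
      intro acc x
      rw [List.foldl_cons, iht]
      by_cases hs : s.1 ∈ SS
      · rw [if_pos hs, mem_foldl_addSucc]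
        simp only [List.mem_cons, List.not_mem_nil, or_false]
        constructor
        · rintro ((h | ⟨l, hl, rfl, hp1, hp2⟩) | ⟨s', hs', h'⟩)
          · exact Or.inl h
          · exact Or.inr ⟨s, Or.inl rfl, hs, l, hl, rfl, hp1, hp2⟩
          · exact Or.inr ⟨s', Or.inr hs', h'⟩
        · rintro (h | ⟨s', hs', h'⟩)
          · exact Or.inl (Or.inl h)
          · rcases hs' with rfl | hs''
            · obtain ⟨_, l, hl, rfl, hp1, hp2⟩ := h'
              exact Or.inl (Or.inr ⟨l, hl, rfl, hp1, hp2⟩)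
            · exact Or.inr ⟨s', hs'', h'⟩
      · rw [if_neg hs]
        constructor
        · rintro (h | ⟨s', hs', h'⟩)
          · exact Or.inl h
          · exact Or.inr ⟨s', List.mem_cons_of_mem _ hs', h'⟩
        · rintro (h | ⟨s', hs', h'⟩)
          · exact Or.inl h
          · rcases List.mem_cons.mp hs' with rfl | hs''
            · exact absurd h'.1 hs
            · exact Or.inr ⟨s', hs'', h'⟩
  intro frontier x
  rw [newOf, aux]
  simp

lemma nodup_newOf (SS : List Int) (states frontier : List (Int × Int)) :
    (newOf SS states frontier).Nodup := by
  have aux : ∀ (fr : List (Int × Int)) (acc : List (Int × Int)), acc.Nodup →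
      (fr.foldl
        (fun acc s =>
          if s.1 ∈ SS then List.foldl (addSucc states s.1) acc [s.2 - 1, s.2, s.2 + 1]
          else acc) acc).Nodup := by
    intro fr
    induction fr with
    | nil => intro acc h; simpa using h
    | cons s t iht =>
      intro acc h
      rw [List.foldl_cons]
      apply iht
      split
      · exact nodup_foldl_addSucc states s.1 _ acc h
      · exact h
  exact aux frontier [] List.nodup_nil

-- B's loop invariant
def StatesInvB (SS : List Int) (M : Int) (states frontier : List (Int × Int)) : Prop :=
  states.Nodup ∧
  (∀ s ∈ states, (0 ≤ s.1 ∧ s.2 ≤ s.1) ∧ (s ∈ UB M ∨ s = (0, 0))) ∧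
  (∀ s ∈ frontier, s ∈ states) ∧
  (∀ s ∈ states, s ∉ frontier → s.1 ∈ SS →
    ∀ l, (l = s.2 - 1 ∨ l = s.2 ∨ l = s.2 + 1) → 0 < s.1 + l → (s.1 + l, l) ∈ states)

lemma newOf_bounds (SS : List Int) (states frontier : List (Int × Int))
    (hinv : StatesInvB SS (bigM SS) states frontier) :
    ∀ x ∈ newOf SS states frontier, (0 ≤ x.1 ∧ x.2 ≤ x.1) ∧ x ∈ UB (bigM SS) := by
  intro x hx
  obtain ⟨s, hs, hsSS, l, hl, rfl, hpos, hnot⟩ := (mem_newOf SS states frontier x).mp hx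
  have hsst := hinv.2.1 s (hinv.2.2.1 s hs)
  have hpM : s.1 ≤ bigM SS := le_bigM SS s.1 hsSS
  have hM0 : 0 ≤ bigM SS := zero_le_bigM SS
  have h0 : 0 ≤ s.1 := hsst.1.1
  have hk : s.2 ≤ s.1 := hsst.1.2
  rw [mem_UB]
  dsimp only
  rcases hl with rfl | rfl | rfl <;>
    refine ⟨⟨by omega, by omega⟩, by omega, by omega, by omega, by omega⟩

lemma Cl_append_iff (SS : List Int) (states new : List (Int × Int))
    (hnew : ∀ x ∈ new, ∃ s ∈ states, s.1 ∈ SS ∧ ∃ l,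
      (l = s.2 - 1 ∨ l = s.2 ∨ l = s.2 + 1) ∧ x = (s.1 + l, l) ∧ 0 < s.1 + l) :
    ∀ x, Cl SS (states ++ new) x ↔ Cl SS states x := by
  intro x
  constructor
  · intro h
    induction h with
    | base t ht =>
      rcases List.mem_append.mp ht with h' | h'
      · exact Cl.base t h'
      · obtain ⟨s, hs, hsSS, l, hl, rfl, hpos⟩ := hnew t h'
        have hbase : Cl SS states (s.1, s.2) := by
          cases s
          exact Cl.base _ hs
        exact Cl.step s.1 s.2 l hbase hsSS hl hpos
    | step q m l hq hqSS hl hpos ih => exact Cl.step q m l ih hqSS hl hpos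
  · intro h
    induction h with
    | base t ht => exact Cl.base t (List.mem_append_left _ ht)
    | step q m l hq hqSS hl hpos ih => exact Cl.step q m l ih hqSS hl hpos

lemma Cl_closed_mem (SS : List Int) (states : List (Int × Int))
    (hclosed : ∀ s ∈ states, s.1 ∈ SS →
      ∀ l, (l = s.2 - 1 ∨ l = s.2 ∨ l = s.2 + 1) → 0 < s.1 + l → (s.1 + l, l) ∈ states) :
    ∀ x, Cl SS states x → x ∈ states := by
  intro x h
  induction h with
  | base t ht => exact ht
  | step q m l hq hqSS hl hpos ih => exact hclosed (q, m) ih hqSS l hl hpos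

lemma loopB_frontier_nil (SS : List Int) :
    ∀ (fuel : Nat) (states : List (Int × Int)), loopB SS fuel states [] = states := by
  intro fuel states
  cases fuel with
  | zero => rfl
  | succ n => rw [show loopB SS (n + 1) states [] = states from rfl]

lemma loopB_iff (SS : List Int) :
    ∀ (fuel : Nat) (states frontier : List (Int × Int)),
      StatesInvB SS (bigM SS) states frontier →
      (UB (bigM SS)).card + 3 - states.length ≤ fuel →
      ∀ x, (x ∈ loopB SS fuel states frontier ↔ Cl SS states x) := by
  intro fuel
  induction fuel with
  | zero =>
    intro states frontier hinv hle x
    have hsub : ∀ s ∈ states, s ∈ insert ((0 : Int), (0 : Int)) (UB (bigM SS)) := by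
      intro s hs
      rcases (hinv.2.1 s hs).2 with h | h
      · exact Finset.mem_insert_of_mem h
      · rw [h]; exact Finset.mem_insert_self _ _
    have := length_le_card states _ hinv.1 hsub
    have hci := Finset.card_insert_le ((0 : Int), (0 : Int)) (UB (bigM SS))
    omega
  | succ n ih =>
    intro states frontier hinv hle x
    by_cases hf : frontier = []
    · subst hf
      rw [loopB_frontier_nil]
      constructor
      · exact fun h => Cl.base x h
      · intro h
        refine Cl_closed_mem SS states ?_ x h
        intro s hs hsSS l hl hpos
        exact hinv.2.2.2 s hs (by simp) hsSS l hl hpos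
    · rw [show loopB SS (n + 1) states frontier =
        (if frontier = [] then states
         else loopB SS n (states ++ newOf SS states frontier) (newOf SS states frontier))
        from rfl]
      rw [if_neg hf]
      by_cases hnew : newOf SS states frontier = []
      · rw [hnew, List.append_nil, loopB_frontier_nil]
        have hclosed : ∀ s ∈ states, s.1 ∈ SS →
            ∀ l, (l = s.2 - 1 ∨ l = s.2 ∨ l = s.2 + 1) → 0 < s.1 + l →
              (s.1 + l, l) ∈ states := by
          intro s hs hsSS l hl hpos
          by_cases hfr : s ∈ frontier
          · by_contra hn
            have : (s.1 + l, l) ∈ newOf SS states frontier :=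
              (mem_newOf SS states frontier _).mpr ⟨s, hfr, hsSS, l, hl, rfl, hpos, hn⟩
            rw [hnew] at this
            simp at this
          · exact hinv.2.2.2 s hs hfr hsSS l hl hpos
        constructor
        · exact fun h => Cl.base x h
        · exact fun h => Cl_closed_mem SS states hclosed x h
      · have hbnd := newOf_bounds SS states frontier hinv
        have hdisj : ∀ a ∈ newOf SS states frontier, a ∉ states := by
          intro a ha
          obtain ⟨s, hs, hsSS, l, hl, rfl, hpos, hn⟩ :=
            (mem_newOf SS states frontier a).mp ha
          exact hn
        have hinv' : StatesInvB SS (bigM SS) (states ++ newOf SS states frontier)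
            (newOf SS states frontier) := by
          refine ⟨?_, ?_, ?_, ?_⟩
          · exact List.Nodup.append hinv.1 (nodup_newOf SS states frontier)
              (fun a ha hb => hdisj a hb ha)
          · intro s hs
            rcases List.mem_append.mp hs with h' | h'
            · exact hinv.2.1 s h'
            · exact ⟨(hbnd s h').1, Or.inl (hbnd s h').2⟩
          · intro s hs
            exact List.mem_append_right _ hs
          · intro s hs hnfr hsSS l hl hpos
            rcases List.mem_append.mp hs with h' | h'
            · by_cases hfr : s ∈ frontier
              · by_cases hin : (s.1 + l, l) ∈ states
                · exact List.mem_append_left _ hin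
                · refine List.mem_append_right _ ?_
                  exact (mem_newOf SS states frontier _).mpr
                    ⟨s, hfr, hsSS, l, hl, rfl, hpos, hin⟩
              · exact List.mem_append_left _ (hinv.2.2.2 s h' hfr hsSS l hl hpos)
            · exact absurd h' hnfr
        have hlen : 1 ≤ (newOf SS states frontier).length := by
          rcases h : newOf SS states frontier with _ | ⟨y, ys⟩
          · exact absurd h hnew
          · simp
        have hle' : (UB (bigM SS)).card + 3 -
            (states ++ newOf SS states frontier).length ≤ n := by
          rw [List.length_append]
          omega
        rw [ih _ _ hinv' hle' x]
        apply Cl_append_iff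
        intro y hy
        obtain ⟨s, hs, hsSS, l, hl, rfl, hpos, hn⟩ :=
          (mem_newOf SS states frontier y).mp hy
        exact ⟨s, hinv.2.2.1 s hs, hsSS, l, hl, rfl, hpos⟩

lemma RS_iff_Cl (SS : List Int) (st : List (Int × Int)) (x : Int × Int) :
    RS SS [] st x ↔ Cl SS st x := by
  constructor
  · intro h
    induction h with
    | base t ht => exact Cl.base t ht
    | step q m l hq hqSS hl hpos hnot ih => exact Cl.step q m l ih hqSS hl hpos
  · intro h
    induction h with
    | base t ht => exact RS.base t ht
    | step q m l hq hqSS hl hpos ih =>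
      exact RS.step q m l ih hqSS hl hpos (by simp)

lemma bool_eq_of_iff (a b : Bool) (h : a = true ↔ b = true) : a = b := by
  cases a <;> cases b <;> simp_all

-- ===== VERDICT (by name: the statement is the Claim_ definition above) =====
theorem canCross_spec : Claim_equal_canCross := by
  intro stones _ _
  unfold Spec_canCross canCross canCross_alt
  cases hg : PySem.List.pyGet? stones (-1) with
  | none => rfl
  | some target =>
    apply bool_eq_of_iff
    have hA := loopA_iff (PySem.Set.ofList stones) target
      (2 * (ubCard (bigM (PySem.Set.ofList stones)) + 1) + 1) [(0, 0)] []
      ⟨List.nodup_nil, by simp⟩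
      (by intro s hs; simp at hs; subst hs; exact ⟨le_refl 0, le_refl 0⟩)
      (by rw [ubCard_eq]; simp only [List.length_nil, List.length_cons]; omega)
    have hB := loopB_iff (PySem.Set.ofList stones)
      (ubCard (bigM (PySem.Set.ofList stones)) + 3) [(0, 0)] [(0, 0)]
      ⟨by simp, by intro s hs; simp at hs; subst hs; exact ⟨⟨le_refl 0, le_refl 0⟩, Or.inr rfl⟩,
        by intro s hs; exact hs,
        by intro s hs hnfr; exact absurd hs hnfr⟩
      (by rw [ubCard_eq]; simp only [List.length_nil, List.length_cons]; omega)
    rw [hA, List.any_eq_true]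
    constructor
    · rintro ⟨m, hm⟩
      have hc : Cl (PySem.Set.ofList stones) [(0, 0)] (target, m) :=
        (RS_iff_Cl _ _ _).mp hm
      exact ⟨(target, m), (hB (target, m)).mpr hc, by simp⟩
    · rintro ⟨s, hs, hts⟩
      have hst : s.1 = target := by simpa using hts
      have hc := (hB s).mp hs
      refine ⟨s.2, (RS_iff_Cl _ _ _).mpr ?_⟩
      rw [← hst]
      cases s
      exact hc
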